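-- pv_equiv track=rewrite | github.com/TakeshiFeit/labs | lab6.2/combObject/combObject/combObject.py | algo_without_func
-- ===== SOURCE A (Python) =====
-- def algo_without_func(num):
--     numbers = []
--     for i in range(0, num + 1, 2):
--         counter1 = 0
--         for symbol in str(i):
--             if symbol == '1' and counter1 < 2:
--                 counter1 += 1
--             else:
--                 counter1 = 2
--                 break
--             numbers.append(i) if (counter1 == 1) else ()
--     return numbers
-- ===== SOURCE B (Python) =====
-- def algo_without_func(num):
--     res = []
--     p = 10
--     while p <= num:
--         hi = min(2 * p, num + 1)
--         res.extend(range(p, hi, 2))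
--         p *= 10
--     return res
-- ===== Notes on version B (the rewrite author's own statement) =====
-- stated objective: faster
-- what changed: Instead of scanning every even number up to num and inspecting its decimal string, B enumerates only the blocks [10^k, 2*10^k) where the leading digit is 1 and emits the even numbers of each block directly.
import Mathlib
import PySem

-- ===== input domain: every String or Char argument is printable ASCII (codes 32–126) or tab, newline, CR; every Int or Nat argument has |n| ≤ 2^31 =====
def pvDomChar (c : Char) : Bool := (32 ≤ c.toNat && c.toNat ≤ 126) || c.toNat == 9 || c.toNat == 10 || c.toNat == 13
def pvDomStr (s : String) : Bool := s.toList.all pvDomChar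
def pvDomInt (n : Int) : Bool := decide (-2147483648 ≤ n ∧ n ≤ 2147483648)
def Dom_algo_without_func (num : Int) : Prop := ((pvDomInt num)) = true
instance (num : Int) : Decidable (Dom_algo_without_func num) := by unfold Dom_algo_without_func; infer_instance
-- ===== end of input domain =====

-- B replaces A's scan of every even number (inspecting each decimal string) by direct
-- enumeration of the even numbers in the leading-digit-1 blocks [10^k, 2*10^k); objective: faster.


-- ===== PORT A =====
-- inner 'for symbol in str(i)' loop; 'break' is ported as returning 'numbers' immediately
def pvInner (i : Int) (cs : List Char) (counter1 : Int) (numbers : List Int) : List Int :=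
  match cs with
  | [] => numbers
  | c :: rest =>
    if c = '1' ∧ counter1 < 2 then
      let counter1' := counter1 + 1
      let numbers' := if counter1' = 1 then numbers ++ [i] else numbers
      pvInner i rest counter1' numbers'
    else numbers

def algo_without_func (num : Int) : List Int :=
  (PySem.List.pyRange 0 (num + 1) 2).foldl
    (fun numbers i => pvInner i (PySem.Int.toStr i).toList 0 numbers) []

-- ===== PORT B =====
-- 'while p <= num' loop of Source B; the '0 < p' conjunct is a totality guard only (p is always 10^k ≥ 10)
def pvBlocks (num p : Int) : List Int :=
  if _h : 0 < p ∧ p ≤ num then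
    PySem.List.pyRange p (min (2 * p) (num + 1)) 2 ++ pvBlocks num (10 * p)
  else []
termination_by (num + 1 - p).toNat
decreasing_by omega

def algo_without_func_alt (num : Int) : List Int := pvBlocks num 10

-- ===== PRECONDITION & SPEC =====
def Spec_algo_without_func (num : Int) (out : List Int) : Prop := out = algo_without_func_alt num
instance (num : Int) (out : List Int) : Decidable (Spec_algo_without_func num out) := by unfold Spec_algo_without_func; infer_instance

-- ===== CLAIM (what is proved, stated in full; the proofs are below) =====
def Claim_equal_algo_without_func : Prop := ∀ (num : Int), Dom_algo_without_func num → Spec_algo_without_func num (algo_without_func num)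

-- ===== LEMMAS AND PROOFS =====

-- leading decimal digit (proof-only helper)
def pvLead (m : Nat) : Nat :=
  if m < 10 then m else pvLead (m / 10)
termination_by m
decreasing_by exact Nat.div_lt_self (by omega) (by omega)

-- the inner loop with counter1 = 2 never appends
theorem pvInner_two (i : Int) (cs : List Char) (numbers : List Int) :
    pvInner i cs 2 numbers = numbers := by
  cases cs <;> simp [pvInner]

-- the inner loop with counter1 = 1 never appends
theorem pvInner_one (i : Int) (cs : List Char) (numbers : List Int) :
    pvInner i cs 1 numbers = numbers := by
  cases cs with
  | nil => rfl
  | cons c rest =>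
    by_cases hc : c = '1' <;> simp [pvInner, hc, pvInner_two]

-- the inner loop appends i exactly when the first character is '1'
theorem pvInner_zero (i : Int) (cs : List Char) (numbers : List Int) :
    pvInner i cs 0 numbers = numbers ++ (if cs.head? = some '1' then [i] else []) := by
  cases cs with
  | nil => simp [pvInner]
  | cons c rest =>
    by_cases hc : c = '1' <;> simp [pvInner, hc, pvInner_one]

-- A is the filter of the even range by 'first digit is 1'
theorem algo_eq_filter (num : Int) :
    algo_without_func num =
      (PySem.List.pyRange 0 (num + 1) 2).filter
        (fun i => decide ((PySem.Int.toChars i).head? = some '1')) := by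
  unfold algo_without_func
  have hfun : (fun (numbers : List Int) (i : Int) => pvInner i (PySem.Int.toStr i).toList 0 numbers)
      = fun numbers i => if (PySem.Int.toChars i).head? = some '1' then numbers ++ [i] else numbers := by
    funext acc x
    rw [PySem.Int.toList_toStr, pvInner_zero]
    split_ifs <;> simp
  rw [hfun, PySem.List.foldl_append_ite_eq_filter]
  simp

-- ## Nat.toDigits structure

theorem pvTdcAcc (b : Nat) : ∀ (f n : Nat) (ds : List Char),
    Nat.toDigitsCore b f n ds = Nat.toDigitsCore b f n [] ++ ds := by
  intro f
  induction f with
  | zero => intro n ds; simp [Nat.toDigitsCore]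
  | succ f ih =>
    intro n ds
    simp only [Nat.toDigitsCore]
    by_cases h : n / b = 0
    · simp [h]
    · simp only [h, if_false]
      rw [ih (n / b) (Nat.digitChar (n % b) :: ds), ih (n / b) [Nat.digitChar (n % b)]]
      simp

theorem pvTdcFuel (b : Nat) (hb : 2 ≤ b) : ∀ (n f1 f2 : Nat), n < f1 → n < f2 →
    Nat.toDigitsCore b f1 n [] = Nat.toDigitsCore b f2 n [] := by
  intro n
  induction n using Nat.strong_induction_on with
  | _ n ih =>
    intro f1 f2 h1 h2
    match f1, f2 with
    | f1 + 1, f2 + 1 =>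
      simp only [Nat.toDigitsCore]
      by_cases h : n / b = 0
      · simp [h]
      · simp only [h, if_false]
        have hn : 0 < n := by
          rcases Nat.eq_zero_or_pos n with h0 | h0
          · exact absurd (by simp [h0]) h
          · exact h0
        have hdiv : n / b < n := Nat.div_lt_self hn (by omega)
        rw [pvTdcAcc b f1 (n / b), pvTdcAcc b f2 (n / b),
          ih (n / b) hdiv f1 f2 (by omega) (by omega)]

theorem pvToDigits_small (m : Nat) (h : m < 10) :
    Nat.toDigits 10 m = [Nat.digitChar m] := by
  simp [Nat.toDigits, Nat.toDigitsCore, Nat.div_eq_of_lt h, Nat.mod_eq_of_lt h]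

theorem pvToDigits_step (m : Nat) (h : 10 ≤ m) :
    Nat.toDigits 10 m = Nat.toDigits 10 (m / 10) ++ [Nat.digitChar (m % 10)] := by
  have hdiv : m / 10 ≠ 0 := by
    have : 1 ≤ m / 10 := (Nat.le_div_iff_mul_le (by omega)).mpr (by omega)
    omega
  show Nat.toDigitsCore 10 (m + 1) m [] = _
  simp only [Nat.toDigitsCore, hdiv, if_false]
  rw [pvTdcAcc 10 m (m / 10),
    pvTdcFuel 10 (by omega) (m / 10) m (m / 10 + 1)
      (Nat.div_lt_self (by omega) (by omega)) (by omega)]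
  rfl

theorem pvToDigits_head (m : Nat) :
    (Nat.toDigits 10 m).head? = some (Nat.digitChar (pvLead m)) := by
  induction m using Nat.strong_induction_on with
  | _ m ih =>
    by_cases h : m < 10
    · rw [pvToDigits_small m h, pvLead, if_pos h]
      rfl
    · have hm : pvLead m = pvLead (m / 10) := by rw [pvLead, if_neg h]
      rw [pvToDigits_step m (by omega), List.head?_append,
        ih (m / 10) (Nat.div_lt_self (by omega) (by omega)), hm]
      rfl

theorem pvLead_le_nine (m : Nat) : pvLead m ≤ 9 := by
  induction m using Nat.strong_induction_on with
  | _ m ih =>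
    rw [pvLead]
    by_cases h : m < 10
    · simp [h]; omega
    · simpa [h] using ih (m / 10) (Nat.div_lt_self (by omega) (by omega))

theorem pvDigitChar_one_iff (d : Nat) (hd : d ≤ 9) :
    Nat.digitChar d = '1' ↔ d = 1 := by
  interval_cases d <;> simp [Nat.digitChar]

theorem pvLead_one_iff (m : Nat) :
    pvLead m = 1 ↔ ∃ k : Nat, 10 ^ k ≤ m ∧ m < 2 * 10 ^ k := by
  induction m using Nat.strong_induction_on with
  | _ m ih =>
    rw [pvLead]
    by_cases h : m < 10
    · simp only [h, if_true]
      constructor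
      · rintro rfl; exact ⟨0, by norm_num⟩
      · rintro ⟨k, hk1, hk2⟩
        match k with
        | 0 => simp only [pow_zero] at hk1 hk2; omega
        | k + 1 =>
          have h10 : 10 ≤ 10 ^ (k + 1) := by
            calc (10:Nat) = 10 ^ 1 := by norm_num
            _ ≤ 10 ^ (k + 1) := Nat.pow_le_pow_right (by omega) (by omega)
          omega
    · simp only [h, if_false]
      rw [ih (m / 10) (Nat.div_lt_self (by omega) (by omega))]
      constructor
      · rintro ⟨k, hk1, hk2⟩
        refine ⟨k + 1, ?_, ?_⟩
        · have := (Nat.le_div_iff_mul_le (by omega : 0 < 10)).mp hk1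
          calc 10 ^ (k + 1) = 10 ^ k * 10 := by ring
          _ ≤ m := this
        · have := (Nat.div_lt_iff_lt_mul (by omega : 0 < 10)).mp hk2
          calc m < 2 * 10 ^ k * 10 := this
          _ = 2 * 10 ^ (k + 1) := by ring
      · rintro ⟨k, hk1, hk2⟩
        match k with
        | 0 => omega
        | k + 1 =>
          refine ⟨k, ?_, ?_⟩
          · exact (Nat.le_div_iff_mul_le (by omega : 0 < 10)).mpr (by
              calc 10 ^ k * 10 = 10 ^ (k + 1) := by ring
              _ ≤ m := hk1)
          · exact (Nat.div_lt_iff_lt_mul (by omega : 0 < 10)).mpr (by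
              calc m < 2 * 10 ^ (k + 1) := hk2
              _ = 2 * 10 ^ k * 10 := by ring)

-- first digit of a nonnegative int is 1  ↔  it lies in some block [10^k, 2*10^k)
theorem pvHead_one_iff (i : Int) (h0 : 0 ≤ i) :
    (PySem.Int.toChars i).head? = some '1' ↔
      ∃ k : Nat, (10 : Int) ^ k ≤ i ∧ i < 2 * 10 ^ k := by
  have hneg : ¬ i < 0 := by omega
  rw [show PySem.Int.toChars i = Nat.toDigits 10 i.toNat by
        simp [PySem.Int.toChars, hneg]]
  rw [pvToDigits_head]
  have h9 := pvLead_le_nine i.toNat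
  constructor
  · intro h
    have h1 : pvLead i.toNat = 1 := by
      exact (pvDigitChar_one_iff _ h9).mp (Option.some.inj h)
    rcases (pvLead_one_iff i.toNat).mp h1 with ⟨k, hk1, hk2⟩
    refine ⟨k, ?_, ?_⟩
    · have : ((10 ^ k : Nat) : Int) ≤ i.toNat := by exact_mod_cast Nat.cast_le.mpr hk1
      push_cast at this ⊢
      omega
    · have : (i.toNat : Int) < ((2 * 10 ^ k : Nat) : Int) := by exact_mod_cast hk2
      push_cast at this ⊢
      omega
  · rintro ⟨k, hk1, hk2⟩
    have h1 : pvLead i.toNat = 1 := by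
      apply (pvLead_one_iff i.toNat).mpr
      refine ⟨k, ?_, ?_⟩
      · have : ((10 ^ k : Nat) : Int) ≤ (i.toNat : Int) := by push_cast; omega
        exact_mod_cast this
      · have : ((i.toNat : Int)) < ((2 * 10 ^ k : Nat) : Int) := by push_cast; omega
        exact_mod_cast this
    rw [(pvDigitChar_one_iff _ h9).mpr h1]

-- membership in A
theorem pvMemA (num x : Int) :
    x ∈ algo_without_func num ↔
      (0 ≤ x ∧ x ≤ num ∧ 2 ∣ x) ∧ ∃ k : Nat, (10 : Int) ^ k ≤ x ∧ x < 2 * 10 ^ k := by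
  rw [algo_eq_filter, List.mem_filter]
  rw [PySem.List.mem_pyRange_iff_of_pos (by norm_num)]
  constructor
  · rintro ⟨⟨hx0, hx1, hx2⟩, hd⟩
    have hhead := of_decide_eq_true hd
    exact ⟨⟨hx0, by omega, by simpa using hx2⟩, (pvHead_one_iff x hx0).mp hhead⟩
  · rintro ⟨⟨hx0, hx1, hx2⟩, hk⟩
    exact ⟨⟨hx0, by omega, by simpa using hx2⟩,
      decide_eq_true ((pvHead_one_iff x hx0).mpr hk)⟩

-- membership in pvBlocks
theorem pvMemBlocks (num p : Int) : 0 < p → ∀ x,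
    (x ∈ pvBlocks num p ↔
      ∃ j : Nat, p * 10 ^ j ≤ x ∧ x < 2 * (p * 10 ^ j) ∧ x ≤ num ∧ 2 ∣ (x - p * 10 ^ j)) := by
  induction p using pvBlocks.induct (num := num) with
  | case1 p h ih =>
    intro hp x
    rw [pvBlocks, dif_pos h, List.mem_append,
      PySem.List.mem_pyRange_iff_of_pos (by norm_num),
      ih (by omega) x]
    constructor
    · rintro (⟨h1, h2, h3⟩ | ⟨j, h1, h2, h3, h4⟩)
      · exact ⟨0, by simpa using h1, by simp; omega, by simp at h2; omega, by simpa using h3⟩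
      · have e : p * 10 ^ (j + 1) = 10 * p * 10 ^ j := by ring
        exact ⟨j + 1, by rw [e]; exact h1, by rw [e]; exact h2, h3, by rw [e]; exact h4⟩
    · rintro ⟨j, h1, h2, h3, h4⟩
      match j with
      | 0 =>
        left
        simp only [pow_zero, mul_one] at h1 h2 h4
        exact ⟨h1, by omega, h4⟩
      | j + 1 =>
        right
        refine ⟨j, ?_, ?_, h3, ?_⟩
        · calc 10 * p * 10 ^ j = p * 10 ^ (j + 1) := by ring
          _ ≤ x := h1
        · calc x < 2 * (p * 10 ^ (j + 1)) := h2
          _ = 2 * (10 * p * 10 ^ j) := by ring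
        · have : p * 10 ^ (j + 1) = 10 * p * 10 ^ j := by ring
          rw [← this]; exact h4
  | case2 p h =>
    intro hp x
    rw [pvBlocks, dif_neg h]
    simp only [List.not_mem_nil, false_iff]
    rintro ⟨j, h1, h2, h3, h4⟩
    have hpow : (1 : Int) ≤ 10 ^ j := one_le_pow₀ (by omega)
    have : p ≤ p * 10 ^ j := le_mul_of_one_le_right (by omega) hpow
    omega

-- membership in B
theorem pvMemB (num x : Int) :
    x ∈ algo_without_func_alt num ↔
      ∃ j : Nat, (10 : Int) ^ (j + 1) ≤ x ∧ x < 2 * 10 ^ (j + 1) ∧ x ≤ num ∧ 2 ∣ x := by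
  unfold algo_without_func_alt
  rw [pvMemBlocks num 10 (by omega) x]
  have key : ∀ j : Nat, (10 : Int) * 10 ^ j = 10 ^ (j + 1) := by
    intro j; rw [pow_succ]; ring
  constructor
  · rintro ⟨j, h1, h2, h3, h4⟩
    rw [key j] at h1 h2 h4
    have hdvd : (2 : Int) ∣ 10 ^ (j + 1) :=
      dvd_trans (by norm_num) (dvd_pow_self 10 (Nat.succ_ne_zero j))
    exact ⟨j, h1, h2, h3, by omega⟩
  · rintro ⟨j, h1, h2, h3, h4⟩
    have hdvd : (2 : Int) ∣ 10 ^ (j + 1) :=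
      dvd_trans (by norm_num) (dvd_pow_self 10 (Nat.succ_ne_zero j))
    exact ⟨j, by rw [key j]; exact h1, by rw [key j]; exact h2, h3, by rw [key j]; omega⟩

-- the two memberships agree
theorem pvMem_iff (num x : Int) :
    x ∈ algo_without_func num ↔ x ∈ algo_without_func_alt num := by
  rw [pvMemA, pvMemB]
  constructor
  · rintro ⟨⟨hx0, hx1, hx2⟩, k, hk1, hk2⟩
    match k with
    | 0 => simp at hk1 hk2; omega
    | k + 1 => exact ⟨k, hk1, hk2, hx1, hx2⟩
  · rintro ⟨j, h1, h2, h3, h4⟩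
    have hpow : (1 : Int) ≤ 10 ^ (j + 1) := one_le_pow₀ (by omega)
    exact ⟨⟨by omega, h3, h4⟩, j + 1, h1, h2⟩

-- strict sortedness of a step-2 range
theorem pvPairwise_pyRange2 (a b : Int) :
    (PySem.List.pyRange a b 2).Pairwise (· < ·) := by
  rw [PySem.List.pyRange_of_pos a b (by norm_num)]
  rw [List.pairwise_map]
  exact (List.pairwise_lt_range).imp (by intro x y h; omega)

theorem pvPairwiseA (num : Int) : (algo_without_func num).Pairwise (· < ·) := by
  rw [algo_eq_filter]
  exact (pvPairwise_pyRange2 0 (num + 1)).sublist List.filter_sublist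

theorem pvPairwiseBlocks (num p : Int) : 0 < p → (pvBlocks num p).Pairwise (· < ·) := by
  induction p using pvBlocks.induct (num := num) with
  | case1 p h ih =>
    intro hp
    rw [pvBlocks, dif_pos h]
    rw [List.pairwise_append]
    refine ⟨pvPairwise_pyRange2 _ _, ih (by omega), ?_⟩
    intro x hx y hy
    rw [PySem.List.mem_pyRange_iff_of_pos (by norm_num)] at hx
    rcases (pvMemBlocks num (10 * p) (by omega) y).mp hy with ⟨j, hy1, _, _, _⟩
    have hpow : (1 : Int) ≤ 10 ^ j := one_le_pow₀ (by omega)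
    have : 10 * p ≤ 10 * p * 10 ^ j := le_mul_of_one_le_right (by omega) hpow
    have hxlt : x < min (2 * p) (num + 1) := hx.2.1
    omega
  | case2 p h =>
    intro hp
    rw [pvBlocks, dif_neg h]
    exact List.Pairwise.nil

theorem pvPairwiseB (num : Int) : (algo_without_func_alt num).Pairwise (· < ·) :=
  pvPairwiseBlocks num 10 (by omega)

-- ===== VERDICT (by name: the statement is the Claim_ definition above) =====
theorem algo_without_func_spec : Claim_equal_algo_without_func := by
  intro num _
  show algo_without_func num = algo_without_func_alt num
  have hA := pvPairwiseA num
  have hB := pvPairwiseB num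
  have hperm : (algo_without_func num).Perm (algo_without_func_alt num) :=
    (List.perm_ext_iff_of_nodup
      (hA.imp (fun h => ne_of_lt h)) (hB.imp (fun h => ne_of_lt h))).mpr
      (pvMem_iff num)
  exact List.eq_of_perm_of_sorted (by intro a b _ _ h1 h2; omega) hA hB hperm
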